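-- pv_equiv track=rewrite | github.com/nagaraj556534/Quotex_Trading | app/strategy12/patterns.py | _select_indices
-- ===== SOURCE A (Python) =====
-- from typing import Dict, List, Tuple, Any, Optional, Set
--
-- def _select_indices(mask_lists: List[List[bool]]) -> List[int]:
--     # Return indices where all masks are True
--     if not mask_lists:
--         return []
--     n = len(mask_lists[0])
--     out: List[int] = []
--     for i in range(n):
--         ok = True
--         for m in mask_lists:
--             if i >= len(m) or not m[i]:
--                 ok = False
--                 break
--         if ok:
--             out.append(i)
--     return out
-- ===== SOURCE B (Python) =====
-- from typing import List
--
-- def _select_indices(mask_lists: List[List[bool]]) -> List[int]: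
--     # Intersect the sets of True positions of all masks, then sort.
--     if not mask_lists:
--         return []
--     common = {i for i, v in enumerate(mask_lists[0]) if v}
--     for m in mask_lists[1:]:
--         common &= {i for i, v in enumerate(m) if v}
--     return sorted(common)
-- ===== Notes on version B (the rewrite author's own statement) =====
-- stated objective: idiomatic
-- what changed: Replaces the per-index inner loop with early break by building each mask's set of True positions once and intersecting the sets, then sorting; the first mask's set bounds the indices so no explicit range scan or length check remains.
import Mathlib
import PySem

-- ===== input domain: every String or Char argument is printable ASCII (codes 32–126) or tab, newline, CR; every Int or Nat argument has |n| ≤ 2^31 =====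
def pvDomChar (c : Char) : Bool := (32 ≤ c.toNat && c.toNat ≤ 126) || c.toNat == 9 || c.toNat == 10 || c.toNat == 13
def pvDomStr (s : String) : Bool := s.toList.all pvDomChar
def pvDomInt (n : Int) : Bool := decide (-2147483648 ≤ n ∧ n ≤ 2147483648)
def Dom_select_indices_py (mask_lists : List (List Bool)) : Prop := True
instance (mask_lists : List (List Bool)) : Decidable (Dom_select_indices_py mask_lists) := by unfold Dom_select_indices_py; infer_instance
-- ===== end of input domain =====

-- B replaces A's per-index scan over all masks (with early break) by intersecting
-- each mask's set of True positions and sorting the result (objective: idiomatic).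

-- ===== PORT A =====
-- inner loop 'for m in mask_lists: if i >= len(m) or not m[i]: ok = False; break'
-- (m[i] ported as pyGetD m i false: i comes from range(n) so 0 ≤ i, and the guard
--  ensures i < len(m) before the access, so the default is never read — exact here)
def okA : List (List Bool) → Int → Bool
  | [], _ => true
  | m :: rest, i =>
    if PySem.List.len m ≤ i ∨ PySem.List.pyGetD m i false = false then false
    else okA rest i

def select_indices_py (mask_lists : List (List Bool)) : List Int :=
  match mask_lists with
  | [] => []
  | m0 :: _ =>
    (PySem.List.pyRange 0 (PySem.List.len m0)).foldl
      (fun out i => if okA mask_lists i then out ++ [i] else out) []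

-- ===== PORT B =====
-- {i for i, v in enumerate(m) if v}
def truePos (m : List Bool) : PySem.Set Int :=
  PySem.Set.ofList (((PySem.List.enumerate m).filter (fun p => p.2)).map (fun p => p.1))

-- 'common &= …' folded over the remaining masks, then sorted(common)
def select_indices_py_alt (mask_lists : List (List Bool)) : List Int :=
  match mask_lists with
  | [] => []
  | m0 :: rest =>
    PySem.List.sorted
      (rest.foldl (fun acc m => PySem.Set.inter acc (truePos m)) (truePos m0))
      (fun x => x)

-- ===== PRECONDITION & SPEC =====
def Spec_select_indices_py (mask_lists : List (List Bool)) (out : List Int) : Prop := out = select_indices_py_alt mask_lists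
instance (mask_lists : List (List Bool)) (out : List Int) : Decidable (Spec_select_indices_py mask_lists out) := by unfold Spec_select_indices_py; infer_instance

-- ===== CLAIM (what is proved, stated in full; the proofs are below) =====
def Claim_equal_select_indices_py : Prop := ∀ (mask_lists : List (List Bool)), Dom_select_indices_py mask_lists → Spec_select_indices_py mask_lists (select_indices_py mask_lists)

-- ===== LEMMAS AND PROOFS =====

-- B's set of True positions of m, as a filter of the index range (Nat indices)
theorem truePos_eq (m : List Bool) :
    truePos m = List.map (fun j : Nat => (j : Int)) ((List.range m.length).filter (fun j => m.getD j false)) := by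
  unfold truePos
  rw [PySem.List.enumerate_eq_map_pyRange m false]
  simp only [PySem.List.len, PySem.List.pyRange_zero_natCast, List.map_map, List.filter_map,
    Function.comp_def, PySem.List.pyGetD_natCast]
  rw [PySem.Set.ofList_eq_self_of_nodup]
  apply List.Nodup.map (fun a b h => by exact_mod_cast h)
  exact (List.nodup_range).filter _

theorem mem_truePos (m : List Bool) (x : Int) :
    x ∈ truePos m ↔ ∃ j : Nat, j < m.length ∧ m.getD j false = true ∧ x = (j : Int) := by
  rw [truePos_eq]
  simp only [List.mem_map, List.mem_filter, List.mem_range]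
  constructor
  · rintro ⟨j, ⟨h1, h2⟩, rfl⟩; exact ⟨j, h1, h2, rfl⟩
  · rintro ⟨j, h1, h2, rfl⟩; exact ⟨j, ⟨h1, h2⟩, rfl⟩

theorem mem_truePos_nat (m : List Bool) (j : Nat) :
    ((j : Int) ∈ truePos m) ↔ (j < m.length ∧ m.getD j false = true) := by
  rw [mem_truePos]
  constructor
  · rintro ⟨k, h1, h2, hc⟩
    have : k = j := by exact_mod_cast hc.symm
    subst this; exact ⟨h1, h2⟩
  · rintro ⟨h1, h2⟩; exact ⟨j, h1, h2, rfl⟩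

-- A's inner loop over the masks, as an 'all' over the mask list
theorem okA_char (mls : List (List Bool)) (j : Nat) :
    okA mls (j : Int) = mls.all (fun m => decide (j < m.length) && m.getD j false) := by
  induction mls with
  | nil => rfl
  | cons m rest ih =>
    simp only [okA, PySem.List.len, PySem.List.pyGetD_natCast, List.all_cons, ih, List.getD]
    by_cases h1 : j < m.length
    · by_cases h2 : m[j]?.getD false = true
      · rw [List.getElem?_eq_getElem h1] at h2
        simp only [Option.getD_some] at h2
        rw [if_neg (by rw [List.getElem?_eq_getElem h1]; simp [h2]; omega)]
        simp [h1, h2]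
      · simp only [Bool.not_eq_true] at h2
        rw [if_pos (Or.inr h2)]
        simp [h2]
    · rw [if_pos (Or.inl (by exact_mod_cast Nat.le_of_not_lt h1))]
      simp [h1]

-- B's '&=' loop over the remaining masks, as one filter of the accumulator
theorem foldl_inter {α : Type} [BEq α] (rest : List (List Bool)) (tp : List Bool → PySem.Set α) (acc : List α) :
    rest.foldl (fun acc m => PySem.Set.inter acc (tp m)) acc
      = acc.filter (fun x => rest.all (fun m => PySem.Set.contains (tp m) x)) := by
  induction rest generalizing acc with
  | nil => simp
  | cons m rest ih =>
    rw [List.foldl_cons, ih (PySem.Set.inter acc (tp m))]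
    simp only [PySem.Set.inter, PySem.Set.contains, List.filter_filter, List.all_cons]
    exact List.filter_congr (fun x _ => by rw [Bool.and_comm])

theorem select_indices_eq (mask_lists : List (List Bool)) :
    select_indices_py mask_lists = select_indices_py_alt mask_lists := by
  match mask_lists with
  | [] => rfl
  | m0 :: rest =>
    show (PySem.List.pyRange 0 (PySem.List.len m0)).foldl
        (fun out i => if okA (m0 :: rest) i then out ++ [i] else out) []
      = PySem.List.sorted
          (rest.foldl (fun acc m => PySem.Set.inter acc (truePos m)) (truePos m0)) (fun x => x)
    rw [foldl_inter rest truePos (truePos m0)]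
    -- B's common set is strictly increasing, so sorted() leaves it unchanged
    rw [PySem.List.sorted_eq_self_of_pairwise]
    · -- both sides as a filter of List.range m0.length
      simp only [PySem.List.len, PySem.List.pyRange_zero_natCast]
      rw [PySem.List.foldl_append_if (okA (m0 :: rest)) (fun i => i)]
      rw [truePos_eq m0]
      simp only [List.filter_map, List.nil_append, Function.comp_def, List.filter_filter,
        List.map_map]
      apply congrArg
      apply List.filter_congr
      intro j hj
      rw [List.mem_range] at hj
      rw [okA_char]
      simp [mem_truePos_nat, hj, List.getD, Bool.and_comm]
    · rw [truePos_eq m0]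
      apply List.Pairwise.filter
      apply (List.pairwise_map).2
      exact ((List.pairwise_lt_range).filter _).imp (fun h => by exact_mod_cast h.le)

-- ===== VERDICT (by name: the statement is the Claim_ definition above) =====
theorem select_indices_py_spec : Claim_equal_select_indices_py := by
  intro mask_lists _
  exact select_indices_eq mask_lists
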